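-- pv_equiv track=rewrite | github.com/Glen02lee/PPS_solved | 3주차 제출/A048_이민석_20250720.py | is_group_word
-- ===== SOURCE A (Python) =====
-- def is_group_word(word):
--     seen = set()
--     last_char = ''
--
--     for ch in word:
--         if ch != last_char:
--             if ch in seen:
--                 return False
--             seen.add(ch)
--             last_char = ch
--     return True
-- ===== SOURCE B (Python) =====
-- def is_group_word(word):
--     if not word:
--         return True
--     transitions = sum(a != b for a, b in zip(word, word[1:]))
--     return transitions + 1 == len(set(word))
-- ===== Notes on version B (the rewrite author's own statement) =====
-- stated objective: alternative
-- what changed: Replaces A's stateful early-exit scan (seen-set + last_char) by the counting identity: a word is a group word iff its number of adjacent unequal pairs plus one (= number of runs) equals its number of distinct characters; B computes both counts and compares them, with no early exit and no per-run membership test.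
import Mathlib
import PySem

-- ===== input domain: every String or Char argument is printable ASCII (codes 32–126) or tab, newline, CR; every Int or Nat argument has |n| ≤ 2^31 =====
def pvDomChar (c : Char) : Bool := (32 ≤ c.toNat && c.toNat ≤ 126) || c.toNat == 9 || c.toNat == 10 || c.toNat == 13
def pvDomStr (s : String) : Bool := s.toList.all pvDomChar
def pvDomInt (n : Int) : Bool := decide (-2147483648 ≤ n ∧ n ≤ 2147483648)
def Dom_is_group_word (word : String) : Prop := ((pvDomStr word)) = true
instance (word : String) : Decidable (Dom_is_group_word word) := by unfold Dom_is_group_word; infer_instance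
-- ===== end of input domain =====

-- B replaces A's stateful early-exit scan by a counting identity (#runs = #distinct chars); return value only, no side effects.

-- ===== PORT A =====
-- A's loop: early return False on a repeated block start; last_char = '' initially is modelled
-- as Option Char (none), which is exact since '' never equals a one-char string.
def isGroupWordGo : List Char → PySem.Set Char → Option Char → Bool
  | [], _, _ => true
  | ch :: rest, seen, last =>
      if some ch ≠ last then
        if PySem.Set.contains seen ch then false
        else isGroupWordGo rest (PySem.Set.add seen ch) (some ch)
      else isGroupWordGo rest seen last

def is_group_word (word : String) : Bool :=
  isGroupWordGo word.toList PySem.Set.empty none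

-- ===== PORT B =====
-- transitions = sum(a != b for a, b in zip(word, word[1:])): counted over the zipped adjacent pairs.
def countTransitions (l : List Char) : Nat :=
  (l.zip (l.drop 1)).countP (fun p => p.1 ≠ p.2)

def is_group_word_alt (word : String) : Bool :=
  let l := word.toList
  if l.isEmpty then true
  else (countTransitions l + 1) == (PySem.Set.ofList l).length

-- ===== PRECONDITION & SPEC =====
def Spec_is_group_word (word : String) (out : Bool) : Prop := out = is_group_word_alt word
instance (word : String) (out : Bool) : Decidable (Spec_is_group_word word out) := by unfold Spec_is_group_word; infer_instance

-- ===== CLAIM (what is proved, stated in full; the proofs are below) =====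
def Claim_equal_is_group_word : Prop := ∀ (word : String), Dom_is_group_word word → Spec_is_group_word word (is_group_word word)

-- ===== LEMMAS AND PROOFS =====

/-- Run compression with an optional "previous character" seed. -/
def rcomp : Option Char → List Char → List Char
  | _, [] => []
  | last, c :: cs => if some c = last then rcomp last cs else c :: rcomp (some c) cs

theorem isGroupWordGo_iff (l : List Char) :
    ∀ (seen : PySem.Set Char) (last : Option Char),
    isGroupWordGo l seen last = true ↔
      ((rcomp last l).Nodup ∧ ∀ x ∈ rcomp last l, x ∉ seen) := by
  induction l with
  | nil => intro seen last; simp [isGroupWordGo, rcomp]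
  | cons c cs ih =>
      intro seen last
      by_cases hlast : some c = last
      · rw [isGroupWordGo, if_neg (by simp [hlast]), ih]
        have : rcomp last (c :: cs) = rcomp last cs := by
          rw [rcomp, if_pos hlast]
        rw [this]
      · rw [isGroupWordGo, if_pos (by simpa using hlast)]
        have hrcomp : rcomp last (c :: cs) = c :: rcomp (some c) cs := by
          rw [rcomp, if_neg hlast]
        rw [hrcomp]
        by_cases hseen : PySem.Set.contains seen c
        · have hmem : c ∈ seen := by
            simpa [PySem.Set.contains] using hseen
          rw [if_pos hseen]
          simp only [Bool.false_eq_true, false_iff]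
          rintro ⟨-, hall⟩
          exact (hall c (List.mem_cons_self ..)) hmem
        · have hcseen : c ∉ seen := by
            simpa [PySem.Set.contains] using hseen
          rw [if_neg hseen, ih]
          simp only [List.nodup_cons, List.mem_cons, PySem.Set.mem_add]
          constructor
          · rintro ⟨hnd, hall⟩
            have hc : c ∉ rcomp (some c) cs := fun hm => (hall c hm) (Or.inr rfl)
            refine ⟨⟨hc, hnd⟩, ?_⟩
            rintro x (rfl | hx)
            · exact hcseen
            · intro hxs
              exact (hall x hx) (Or.inl hxs)
          · rintro ⟨⟨hc, hnd⟩, hall⟩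
            refine ⟨hnd, fun x hx h => ?_⟩
            rcases h with hxs | rfl
            · exact (hall x (Or.inr hx)) hxs
            · exact hc hx

/-- PySem.Set.ofList keeps a sublist of its argument. -/
theorem foldl_add_sublist (xs : List Char) :
    ∀ s : PySem.Set Char, ∃ t, xs.foldl PySem.Set.add s = s ++ t ∧ t.Sublist xs := by
  induction xs with
  | nil => intro s; exact ⟨[], by simp, List.nil_sublist _⟩
  | cons x xs ih =>
      intro s
      obtain ⟨t, ht, hsub⟩ := ih (PySem.Set.add s x)
      by_cases h : PySem.Set.contains s x
      · refine ⟨t, ?_, hsub.cons x⟩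
        have hx : x ∈ s := by simpa [PySem.Set.contains] using h
        have hadd : PySem.Set.add s x = s := by simp [PySem.Set.add, PySem.Set.contains, hx]
        rw [List.foldl_cons, ht, hadd]
      · refine ⟨x :: t, ?_, hsub.cons₂ x⟩
        have hx : x ∉ s := by simpa [PySem.Set.contains] using h
        have hadd : PySem.Set.add s x = s ++ [x] := by simp [PySem.Set.add, PySem.Set.contains, hx]
        rw [List.foldl_cons, ht, hadd]
        simp

theorem length_eq_ofList_iff_nodup (bs : List Char) :
    (bs.length == (PySem.Set.ofList bs).length) = decide bs.Nodup := by
  by_cases h : bs.Nodup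
  · simp [PySem.Set.ofList_eq_self_of_nodup bs h, h]
  · obtain ⟨t, ht, hsub⟩ := foldl_add_sublist bs PySem.Set.empty
    have hofl : PySem.Set.ofList bs = t := by
      rw [PySem.Set.ofList_eq_foldl]
      simpa [PySem.Set.empty] using ht
    have hne : bs.length ≠ t.length := by
      intro hlen
      have ht' : t = bs := hsub.eq_of_length hlen.symm
      have hnd : t.Nodup := hofl ▸ PySem.Set.nodup_ofList bs
      exact h (ht' ▸ hnd)
    simp [hofl, h, hne]

/-- Folding `Set.add` over the run compression equals folding over the list itself,
    provided the seed already contains the previous character. -/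
theorem foldl_add_rcomp (l : List Char) :
    ∀ (last : Option Char) (s : PySem.Set Char), (∀ c, last = some c → c ∈ s) →
    (rcomp last l).foldl PySem.Set.add s = l.foldl PySem.Set.add s := by
  induction l with
  | nil => intro last s _; rfl
  | cons c cs ih =>
      intro last s hs
      by_cases h : some c = last
      · have hc : c ∈ s := hs c h.symm
        have hadd : PySem.Set.add s c = s := by
          simp [PySem.Set.add, PySem.Set.contains, hc]
        rw [rcomp, if_pos h, List.foldl_cons, hadd, ih last s hs]
      · rw [rcomp, if_neg h, List.foldl_cons, List.foldl_cons]
        refine ih (some c) (PySem.Set.add s c) ?_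
        rintro d hd
        cases hd
        simp [PySem.Set.mem_add]

theorem ofList_rcomp_none (l : List Char) :
    PySem.Set.ofList (rcomp none l) = PySem.Set.ofList l := by
  rw [PySem.Set.ofList_eq_foldl, PySem.Set.ofList_eq_foldl]
  exact foldl_add_rcomp l none PySem.Set.empty (by simp)

/-- Length of a seeded run compression vs. the unseeded one on a nonempty list. -/
theorem rcomp_some_length (c : Char) (d : Char) (ds : List Char) :
    (rcomp (some c) (d :: ds)).length
      = (rcomp none (d :: ds)).length - (if d = c then 1 else 0) := by
  by_cases h : d = c
  · subst h
    have h1 : rcomp (some d) (d :: ds) = rcomp (some d) ds := by simp [rcomp]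
    have h2 : rcomp none (d :: ds) = d :: rcomp (some d) ds := by simp [rcomp]
    rw [if_pos rfl, h1, h2]
    simp
  · have h1 : rcomp (some c) (d :: ds) = d :: rcomp (some d) ds := by
      simp [rcomp, h]
    have h2 : rcomp none (d :: ds) = d :: rcomp (some d) ds := by simp [rcomp]
    rw [if_neg h, h1, h2]
    simp

/-- The counting identity: transitions + 1 = number of runs, for nonempty lists. -/
theorem countTransitions_succ (c : Char) (cs : List Char) :
    countTransitions (c :: cs) + 1 = (rcomp none (c :: cs)).length := by
  induction cs generalizing c with
  | nil => simp [countTransitions, rcomp]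
  | cons d ds ih =>
      have hz : countTransitions (c :: d :: ds)
          = (if c ≠ d then 1 else 0) + countTransitions (d :: ds) := by
        simp [countTransitions, List.countP_cons]
        by_cases h : c = d
        · simp [h]
        · simp [h]
          omega
      have hr : rcomp none (c :: d :: ds) = c :: rcomp (some c) (d :: ds) := by
        simp [rcomp]
      have hlen := rcomp_some_length c d ds
      have hih := ih d
      have hpos : 0 < (rcomp none (d :: ds)).length := by
        simp [rcomp]
      rw [hz, hr]
      simp only [List.length_cons]
      by_cases h : c = d
      · rw [if_neg (by simpa using h), hlen, if_pos h.symm]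
        omega
      · rw [if_pos (by simpa using h), hlen, if_neg (fun hd => h hd.symm)]
        omega

-- ===== VERDICT (by name: the statement is the Claim_ definition above) =====
theorem is_group_word_spec : Claim_equal_is_group_word := by
  intro word _
  show is_group_word word = is_group_word_alt word
  rw [is_group_word, is_group_word_alt]
  cases hl : word.toList with
  | nil => simp [isGroupWordGo]
  | cons c cs =>
      simp only [List.isEmpty_cons, if_neg Bool.false_ne_true]
      rw [countTransitions_succ, ← ofList_rcomp_none, length_eq_ofList_iff_nodup]
      have hA : isGroupWordGo (c :: cs) PySem.Set.empty none
          = decide ((rcomp none (c :: cs)).Nodup) := by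
        rw [Bool.eq_iff_iff, isGroupWordGo_iff, decide_eq_true_iff]
        constructor
        · rintro ⟨h, -⟩; exact h
        · intro h
          exact ⟨h, fun x _ hx => by simp [PySem.Set.empty] at hx⟩
      exact hA
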